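-- pv_equiv track=rewrite | github.com/thuurzz/Python | impacta_1sem/exercicios_py/aula_08.1/AC5_logic.py | impar
-- ===== SOURCE A (Python) =====
-- def impar(lista):
--     cont = len(lista)
--     p = 0
--     ind = 0
--     ip = 0
--     for i in range(cont):
--         if lista[i] % 2 != 0:
--             ind = i
--     return ind
-- ===== SOURCE B (Python) =====
-- def impar(lista):
--     i = len(lista) - 1
--     while i >= 0:
--         if lista[i] % 2 != 0:
--             return i
--         i -= 1
--     return 0
-- ===== Notes on version B (the rewrite author's own statement) =====
-- stated objective: alternative
-- what changed: B scans the indices backwards and returns at the first odd element (early exit) instead of A's forward pass that keeps overwriting a running accumulator; the no-odd/empty default 0 is kept.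
import Mathlib
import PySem

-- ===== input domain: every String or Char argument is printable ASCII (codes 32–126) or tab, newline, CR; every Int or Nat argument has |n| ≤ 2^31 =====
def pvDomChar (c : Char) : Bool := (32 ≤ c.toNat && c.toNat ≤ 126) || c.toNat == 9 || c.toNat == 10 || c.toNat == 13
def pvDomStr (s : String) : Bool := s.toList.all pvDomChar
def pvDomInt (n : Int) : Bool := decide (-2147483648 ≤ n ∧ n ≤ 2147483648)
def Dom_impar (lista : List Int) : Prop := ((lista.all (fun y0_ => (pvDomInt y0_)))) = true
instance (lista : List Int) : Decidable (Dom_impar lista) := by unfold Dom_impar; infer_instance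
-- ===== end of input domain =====

-- ===== PORT A =====
-- forward pass: overwrite the accumulator at every odd element
def impar (lista : List Int) : Int :=
  let cont : Int := lista.length
  (PySem.List.pyRange 0 cont 1).foldl
    (fun ind i => if PySem.List.pyGetD lista i 0 % 2 ≠ 0 then i else ind) 0

-- ===== PORT B =====
-- B: backward scan from the last index, returning at the first odd element; 0 if none.
-- imparGo lista k scans indices k-1, k-2, …, 0 (the while loop with i = k-1 downwards)
def imparGo (lista : List Int) : Nat → Int
  | 0 => 0
  | k + 1 => if lista.getD k 0 % 2 ≠ 0 then (k : Int) else imparGo lista k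

def impar_alt (lista : List Int) : Int := imparGo lista lista.length

-- ===== PRECONDITION & SPEC =====
def Spec_impar (lista : List Int) (out : Int) : Prop := out = impar_alt lista
instance (lista : List Int) (out : Int) : Decidable (Spec_impar lista out) := by unfold Spec_impar; infer_instance

-- ===== CLAIM (what is proved, stated in full; the proofs are below) =====
def Claim_equal_impar : Prop := ∀ (lista : List Int), Dom_impar lista → Spec_impar lista (impar lista)

-- ===== LEMMAS AND PROOFS =====

-- A's forward overwrite fold over range(n) equals B's backward first-match scan from index n-1
theorem impar_fold_eq_go (lista : List Int) (n : Nat) (hn : n ≤ lista.length) :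
    (PySem.List.pyRange 0 (n : Int) 1).foldl
      (fun ind i => if PySem.List.pyGetD lista i 0 % 2 ≠ 0 then i else ind) 0
    = imparGo lista n := by
  induction n with
  | zero => simp [PySem.List.pyRange_one_eq_nil, imparGo]
  | succ k ih =>
    have hsplit : PySem.List.pyRange 0 ((k : Int) + 1) 1
        = PySem.List.pyRange 0 (k : Int) 1 ++ [(k : Int)] :=
      PySem.List.pyRange_one_succ_right (by positivity)
    have hk : ((k : Int) + 1) = ((k + 1 : Nat) : Int) := by push_cast; ring
    rw [← hk, hsplit, List.foldl_append, ih (by omega)]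
    simp [imparGo, PySem.List.pyGetD_natCast]

theorem impar_spec : Claim_equal_impar := by
  intro lista _
  unfold Spec_impar impar impar_alt
  simpa using impar_fold_eq_go lista lista.length le_rfl
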